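-- pv_equiv track=rewrite | github.com/lazy-dinosaur/CryptoFlow | server/orderflow_bot.py | _count_stacked_imbalances
-- ===== SOURCE A (Python) =====
-- def _count_stacked_imbalances(imbalance_prices, candle_low, candle_high, tick_size=10):
--     if len(imbalance_prices) < 2:
--         return 0
--     sorted_prices = sorted(imbalance_prices)
--     max_stack = 1
--     current_stack = 1
--     for i in range(1, len(sorted_prices)):
--         if abs(sorted_prices[i] - sorted_prices[i-1]) <= tick_size * 2:
--             current_stack += 1
--             max_stack = max(max_stack, current_stack)
--         else:
--             current_stack = 1
--     return max_stack
-- ===== SOURCE B (Python) =====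
-- def _longest_true_run(flags):
--     # longest run of consecutive True values, consumed run by run
--     best = 0
--     while flags:
--         run = 0
--         while flags and flags[0]:
--             run += 1
--             flags = flags[1:]
--         best = max(best, run)
--         if flags:
--             flags = flags[1:]  # skip the False separating the runs
--     return best
--
--
-- def _count_stacked_imbalances(imbalance_prices, candle_low, candle_high, tick_size=10):
--     if len(imbalance_prices) < 2:
--         return 0
--     s = sorted(imbalance_prices)
--     flags = [abs(b - a) <= tick_size * 2 for a, b in zip(s, s[1:])]
--     return _longest_true_run(flags) + 1
-- ===== Notes on version B (the rewrite author's own statement) =====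
-- stated objective: alternative
-- what changed: Instead of A's single pass with max/current counters over adjacent sorted elements, B precomputes a boolean adjacency-flag table from zipped sorted neighbours and computes the longest run of True flags by consuming the list run by run (inner run-counting loop plus outer run loop), returning that length + 1.
import Mathlib
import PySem

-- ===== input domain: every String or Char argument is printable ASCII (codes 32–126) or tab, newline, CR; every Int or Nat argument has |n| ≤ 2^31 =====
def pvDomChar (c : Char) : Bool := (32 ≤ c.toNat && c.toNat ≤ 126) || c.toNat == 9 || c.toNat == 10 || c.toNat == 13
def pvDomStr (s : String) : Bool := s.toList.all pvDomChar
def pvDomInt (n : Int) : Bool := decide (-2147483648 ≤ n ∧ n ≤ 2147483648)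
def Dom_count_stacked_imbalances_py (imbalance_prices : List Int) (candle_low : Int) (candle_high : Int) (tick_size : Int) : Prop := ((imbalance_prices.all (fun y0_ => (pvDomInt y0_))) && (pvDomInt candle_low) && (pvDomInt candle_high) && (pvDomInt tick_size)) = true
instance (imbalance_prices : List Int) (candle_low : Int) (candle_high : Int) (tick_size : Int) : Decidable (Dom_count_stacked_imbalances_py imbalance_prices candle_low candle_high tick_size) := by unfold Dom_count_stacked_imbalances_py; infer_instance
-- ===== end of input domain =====

-- B re-derives the answer as 1 + the longest run of True in a precomputed adjacency-flag
-- table, consuming the flag list run by run (objective: alternative decomposition; same cost).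

-- ===== PORT A =====
-- loop body of A's `for i in range(1, len(sorted_prices))`
def pvStepA (tick_size : Int) (s : List Int) (st : Int × Int) (i : Int) : Int × Int :=
  if |(PySem.List.pyGet? s i).getD 0 - (PySem.List.pyGet? s (i - 1)).getD 0| ≤ tick_size * 2 then
    (max st.1 (st.2 + 1), st.2 + 1)   -- current_stack += 1; max_stack = max(max_stack, current_stack)
  else
    (st.1, 1)                         -- current_stack = 1
-- indices produced by range(1, len) are in range, so the `.getD 0` default is never used

def count_stacked_imbalances_py (imbalance_prices : List Int) (candle_low : Int) (candle_high : Int) (tick_size : Int) : Int :=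
  if imbalance_prices.length < 2 then 0
  else
    let sorted_prices := PySem.List.sorted imbalance_prices (fun x => x) false
    (((PySem.List.pyRange 1 (sorted_prices.length : Int) 1).foldl (pvStepA tick_size sorted_prices) (1, 1))).1

-- ===== PORT B =====
-- inner `while flags and flags[0]` loop of _longest_true_run: returns (run, remaining flags)
def pvLeadRun : List Bool → Int × List Bool
  | [] => (0, [])
  | false :: t => (0, false :: t)
  | true :: t => ((pvLeadRun t).1 + 1, (pvLeadRun t).2)

theorem pvLeadRun_length_le : ∀ l : List Bool, (pvLeadRun l).2.length ≤ l.length := by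
  intro l
  induction l with
  | nil => simp [pvLeadRun]
  | cons f t ih => cases f <;> simp [pvLeadRun] <;> omega

-- outer `while flags` loop of _longest_true_run; `flags = flags[1:]` on a nonempty list is `.tail`
def pvLongestTrueRun : List Bool → Int → Int
  | [], best => best
  | f :: t, best =>
    if (pvLeadRun (f :: t)).2 = [] then max best (pvLeadRun (f :: t)).1
    else pvLongestTrueRun ((pvLeadRun (f :: t)).2.tail) (max best (pvLeadRun (f :: t)).1)
termination_by l _ => l.length
decreasing_by
  have hle := pvLeadRun_length_le (f :: t)
  rename_i h
  cases hp : (pvLeadRun (f :: t)).2 with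
  | nil => exact absurd hp h
  | cons x rt => rw [hp] at hle; simp at hle ⊢; omega

def count_stacked_imbalances_py_alt (imbalance_prices : List Int) (candle_low : Int) (candle_high : Int) (tick_size : Int) : Int :=
  if imbalance_prices.length < 2 then 0
  else
    let s := PySem.List.sorted imbalance_prices (fun x => x) false
    let flags := (s.zip (PySem.List.slice s (some 1) none)).map
      (fun p => decide (|p.2 - p.1| ≤ tick_size * 2))
    pvLongestTrueRun flags 0 + 1

-- ===== PRECONDITION & SPEC =====
def Spec_count_stacked_imbalances_py (imbalance_prices : List Int) (candle_low : Int) (candle_high : Int) (tick_size : Int) (out : Int) : Prop := out = count_stacked_imbalances_py_alt imbalance_prices candle_low candle_high tick_size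
instance (imbalance_prices : List Int) (candle_low : Int) (candle_high : Int) (tick_size : Int) (out : Int) : Decidable (Spec_count_stacked_imbalances_py imbalance_prices candle_low candle_high tick_size out) := by unfold Spec_count_stacked_imbalances_py; infer_instance

-- ===== CLAIM (what is proved, stated in full; the proofs are below) =====
def Claim_equal_count_stacked_imbalances_py : Prop := ∀ (imbalance_prices : List Int) (candle_low : Int) (candle_high : Int) (tick_size : Int), Dom_count_stacked_imbalances_py imbalance_prices candle_low candle_high tick_size → Spec_count_stacked_imbalances_py imbalance_prices candle_low candle_high tick_size (count_stacked_imbalances_py imbalance_prices candle_low candle_high tick_size)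

-- ===== LEMMAS AND PROOFS =====

-- unfolding lemmas for the two branches of the outer loop
theorem pvLTR_pos (f : Bool) (t : List Bool) (best : Int) (h : (pvLeadRun (f :: t)).2 = []) :
    pvLongestTrueRun (f :: t) best = max best (pvLeadRun (f :: t)).1 := by
  rw [pvLongestTrueRun, if_pos h]

theorem pvLTR_neg (f : Bool) (t : List Bool) (best : Int) (h : ¬ (pvLeadRun (f :: t)).2 = []) :
    pvLongestTrueRun (f :: t) best =
      pvLongestTrueRun ((pvLeadRun (f :: t)).2.tail) (max best (pvLeadRun (f :: t)).1) := by
  rw [pvLongestTrueRun, if_neg h]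

theorem pvLeadRun_fst_nonneg : ∀ l : List Bool, 0 ≤ (pvLeadRun l).1 := by
  intro l
  induction l with
  | nil => simp [pvLeadRun]
  | cons f t ih => cases f <;> simp [pvLeadRun] <;> omega

theorem pvLeadRun_snd_shape : ∀ l : List Bool,
    (pvLeadRun l).2 = [] ∨ ∃ rt, (pvLeadRun l).2 = false :: rt := by
  intro l
  induction l with
  | nil => simp [pvLeadRun]
  | cons f t ih =>
    cases f
    · exact Or.inr ⟨t, rfl⟩
    · simpa [pvLeadRun] using ih

-- proof-side view of B's flag table, structured for induction
def pvFlagsOf (t : Int) : Int → List Int → List Bool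
  | _, [] => []
  | a, b :: r => decide (|b - a| ≤ t * 2) :: pvFlagsOf t b r

-- A's loop body seen as a function of the adjacency flag
def pvStepF (st : Int × Int) (f : Bool) : Int × Int :=
  if f then (max st.1 (st.2 + 1), st.2 + 1) else (st.1, 1)

theorem pvFlags_eq (t : Int) : ∀ (a : Int) (r : List Int),
    ((a :: r).zip r).map (fun p => decide (|p.2 - p.1| ≤ t * 2)) = pvFlagsOf t a r := by
  intro a r
  induction r generalizing a with
  | nil => simp [pvFlagsOf]
  | cons b r ih => simp [pvFlagsOf, ih]

theorem pvLongest_ge_best_aux : ∀ (n : Nat) (l : List Bool), l.length ≤ n → ∀ best : Int,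
    best ≤ pvLongestTrueRun l best := by
  intro n
  induction n with
  | zero =>
    intro l hl best
    cases l with
    | nil => simp [pvLongestTrueRun]
    | cons f t => simp at hl
  | succ n ih =>
    intro l hl best
    cases l with
    | nil => simp [pvLongestTrueRun]
    | cons f t =>
      by_cases h : (pvLeadRun (f :: t)).2 = []
      · rw [pvLTR_pos f t best h]; omega
      · rw [pvLTR_neg f t best h]
        have hle := pvLeadRun_length_le (f :: t)
        have h1 := ih ((pvLeadRun (f :: t)).2.tail)
          (by cases hp : (pvLeadRun (f :: t)).2 with
              | nil => exact absurd hp h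
              | cons x rt =>
                rw [hp] at hle; simp [hp]; simp at hle hl; omega)
          (max best (pvLeadRun (f :: t)).1)
        omega

theorem pvLongest_ge_best (l : List Bool) (best : Int) : best ≤ pvLongestTrueRun l best :=
  pvLongest_ge_best_aux l.length l le_rfl best

theorem pvLongest_extract_aux : ∀ (n : Nat) (l : List Bool), l.length ≤ n → ∀ best : Int,
    0 ≤ best → pvLongestTrueRun l best = max best (pvLongestTrueRun l 0) := by
  intro n
  induction n with
  | zero =>
    intro l hl best hb
    cases l with
    | nil => simp [pvLongestTrueRun]; omega
    | cons f t => simp at hl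
  | succ n ih =>
    intro l hl best hb
    cases l with
    | nil => simp [pvLongestTrueRun]; omega
    | cons f t =>
      have hn := pvLeadRun_fst_nonneg (f :: t)
      by_cases h : (pvLeadRun (f :: t)).2 = []
      · rw [pvLTR_pos f t best h, pvLTR_pos f t 0 h]; omega
      · rw [pvLTR_neg f t best h, pvLTR_neg f t 0 h]
        have hle := pvLeadRun_length_le (f :: t)
        have htl : (pvLeadRun (f :: t)).2.tail.length ≤ n := by
          cases hp : (pvLeadRun (f :: t)).2 with
          | nil => exact absurd hp h
          | cons x rt => rw [hp] at hle; simp [hp]; simp at hle hl; omega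
        rw [ih _ htl (max best (pvLeadRun (f :: t)).1) (by omega),
            ih _ htl (max 0 (pvLeadRun (f :: t)).1) (by omega)]
        omega

theorem pvLongest_extract (l : List Bool) (best : Int) (hb : 0 ≤ best) :
    pvLongestTrueRun l best = max best (pvLongestTrueRun l 0) :=
  pvLongest_extract_aux l.length l le_rfl best hb

theorem pvLongest_nonneg (l : List Bool) : 0 ≤ pvLongestTrueRun l 0 :=
  pvLongest_ge_best l 0

theorem pvLead_le_longest : ∀ l : List Bool, (pvLeadRun l).1 ≤ pvLongestTrueRun l 0 := by
  intro l
  cases l with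
  | nil => simp [pvLeadRun, pvLongestTrueRun]
  | cons f t =>
    by_cases h : (pvLeadRun (f :: t)).2 = []
    · rw [pvLTR_pos f t 0 h]; omega
    · rw [pvLTR_neg f t 0 h]
      have := pvLongest_ge_best ((pvLeadRun (f :: t)).2.tail) (max 0 (pvLeadRun (f :: t)).1)
      omega

theorem pvLongest_false_cons (t : List Bool) :
    pvLongestTrueRun (false :: t) 0 = pvLongestTrueRun t 0 := by
  have h : (pvLeadRun (false :: t)).2 = false :: t := rfl
  rw [pvLTR_neg false t 0 (by rw [h]; simp)]
  rw [h]
  simp [pvLeadRun]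

theorem pvLongest_true_cons (t : List Bool) :
    pvLongestTrueRun (true :: t) 0 = max ((pvLeadRun t).1 + 1) (pvLongestTrueRun t 0) := by
  have hlead : pvLeadRun (true :: t) = ((pvLeadRun t).1 + 1, (pvLeadRun t).2) := rfl
  have hn := pvLeadRun_fst_nonneg t
  by_cases hr : (pvLeadRun t).2 = []
  · -- no False remains after the leading run
    rw [pvLTR_pos true t 0 (by rw [hlead]; exact hr), hlead]
    cases t with
    | nil => simp [pvLongestTrueRun, pvLeadRun]
    | cons g t' =>
      rw [pvLTR_pos g t' 0 hr]
      omega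
  · rcases pvLeadRun_snd_shape t with h0 | ⟨rt, h0⟩
    · exact absurd h0 hr
    · rw [pvLTR_neg true t 0 (by rw [hlead]; exact hr), hlead]
      cases t with
      | nil => simp [pvLeadRun] at h0
      | cons g t' =>
        rw [pvLTR_neg g t' 0 hr]
        rw [h0]
        simp only [List.tail_cons]
        rw [pvLongest_extract rt (max 0 ((pvLeadRun (g :: t')).1 + 1)) (by omega),
            pvLongest_extract rt (max 0 (pvLeadRun (g :: t')).1) (by omega)]
        omega

-- A's counter loop over the flag list equals 1 + B's longest-run value
theorem pvLoopF (fl : List Bool) : ∀ (m c : Int), 1 ≤ c → c ≤ m →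
    (fl.foldl pvStepF (m, c)).1 =
      max m (max (c + (pvLeadRun fl).1) (1 + pvLongestTrueRun fl 0)) := by
  induction fl with
  | nil => intro m c h1 h2; simp [pvLeadRun, pvLongestTrueRun]; omega
  | cons f t ih =>
    intro m c h1 h2
    have hn := pvLeadRun_fst_nonneg t
    cases f
    · -- flag False: current_stack resets to 1
      have hx := pvLead_le_longest t
      rw [List.foldl_cons]
      show (t.foldl pvStepF (m, 1)).1 = _
      rw [ih m 1 le_rfl (by omega), pvLongest_false_cons]
      have h5 : (pvLeadRun (false :: t)).1 = 0 := rfl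
      rw [h5]
      omega
    · -- flag True: current_stack += 1
      rw [List.foldl_cons]
      show (t.foldl pvStepF (max m (c + 1), c + 1)).1 = _
      rw [ih (max m (c + 1)) (c + 1) (by omega) (by omega), pvLongest_true_cons]
      have h5 : (pvLeadRun (true :: t)).1 = (pvLeadRun t).1 + 1 := rfl
      rw [h5]
      omega

-- the range-indexed fold over the sorted list is the fold over the flag list
theorem pvBridge (t : Int) : ∀ (r : List Int) (a : Int) (st : Int × Int),
    (List.range r.length).foldl (fun (st : Int × Int) (k : Nat) => pvStepA t (a :: r) st (1 + (k : Int))) st =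
      (pvFlagsOf t a r).foldl pvStepF st := by
  intro r
  induction r with
  | nil => intro a st; simp [pvFlagsOf]
  | cons b r ih =>
    intro a st
    show ((List.range (r.length + 1)).foldl _ st) = _
    rw [List.range_succ_eq_map, List.foldl_cons, List.foldl_map]
    have h0 : pvStepA t (a :: b :: r) st (1 + ((0 : Nat) : Int)) = pvStepF st (decide (|b - a| ≤ t * 2)) := by
      simp [pvStepA, pvStepF]
    rw [h0]
    have hcong : (List.range r.length).foldl
        (fun (st : Int × Int) (k : Nat) => pvStepA t (a :: b :: r) st (1 + ((Nat.succ k : Nat) : Int)))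
        (pvStepF st (decide (|b - a| ≤ t * 2))) =
        (List.range r.length).foldl
        (fun (st : Int × Int) (k : Nat) => pvStepA t (b :: r) st (1 + (k : Int)))
        (pvStepF st (decide (|b - a| ≤ t * 2))) := by
      apply PySem.List.foldl_congr_mem
      intro st' k _
      have hi1 : (0 : Int) ≤ 1 + ((Nat.succ k : Nat) : Int) := by positivity
      have hi2 : (0 : Int) ≤ 1 + ((Nat.succ k : Nat) : Int) - 1 := by push_cast; omega
      have hi3 : (0 : Int) ≤ 1 + ((k : Nat) : Int) := by positivity
      have hi4 : (0 : Int) ≤ 1 + ((k : Nat) : Int) - 1 := by omega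
      have g1 : PySem.List.pyGet? (a :: b :: r) (1 + ((Nat.succ k : Nat) : Int)) = r[k]? := by
        rw [PySem.List.pyGet?_of_nonneg (a :: b :: r) hi1]
        have h2 : ((1 : Int) + ((Nat.succ k : Nat) : Int)).toNat = k + 2 := by push_cast; omega
        rw [h2]; simp
      have g2 : PySem.List.pyGet? (a :: b :: r) (1 + ((Nat.succ k : Nat) : Int) - 1) = (b :: r)[k]? := by
        rw [PySem.List.pyGet?_of_nonneg (a :: b :: r) hi2]
        have h2 : ((1 : Int) + ((Nat.succ k : Nat) : Int) - 1).toNat = k + 1 := by push_cast; omega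
        rw [h2]; simp
      have g3 : PySem.List.pyGet? (b :: r) (1 + ((k : Nat) : Int)) = r[k]? := by
        rw [PySem.List.pyGet?_of_nonneg (b :: r) hi3]
        have h2 : ((1 : Int) + ((k : Nat) : Int)).toNat = k + 1 := by omega
        rw [h2]; simp
      have g4 : PySem.List.pyGet? (b :: r) (1 + ((k : Nat) : Int) - 1) = (b :: r)[k]? := by
        rw [PySem.List.pyGet?_of_nonneg (b :: r) hi4]
        have h2 : ((1 : Int) + ((k : Nat) : Int) - 1).toNat = k := by omega
        rw [h2]
      simp only [pvStepA, g1, g2, g3, g4]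
    rw [hcong, ih b]
    simp [pvFlagsOf]

-- ===== VERDICT (by name: the statement is the Claim_ definition above) =====
theorem count_stacked_imbalances_py_spec : Claim_equal_count_stacked_imbalances_py := by
  intro ips lo hi t _
  unfold Spec_count_stacked_imbalances_py count_stacked_imbalances_py count_stacked_imbalances_py_alt
  by_cases hlen : ips.length < 2
  · simp [hlen]
  · simp only [hlen, if_false]
    set s := PySem.List.sorted ips (fun x => x) false with hs
    have hslen : s.length = ips.length := PySem.List.length_sorted ips (fun x => x) false
    obtain ⟨a, r, hsr⟩ : ∃ a r, s = a :: r := by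
      cases h : s with
      | nil => exfalso; rw [h] at hslen; simp at hslen; omega
      | cons a r => exact ⟨a, r, rfl⟩
    rw [hsr]
    rw [PySem.List.slice_from_one]
    rw [show (a :: r).tail = r from rfl]
    rw [pvFlags_eq]
    have hrange : PySem.List.pyRange 1 (((a :: r).length : Nat) : Int) 1 =
        (List.range r.length).map (fun k : Nat => 1 + (k : Int)) := by
      rw [PySem.List.pyRange_one]
      have : ((((a :: r).length : Nat) : Int) - 1).toNat = r.length := by simp
      rw [this]
    rw [hrange, List.foldl_map, pvBridge]
    have h1 := pvLead_le_longest (pvFlagsOf t a r)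
    have h2 := pvLongest_nonneg (pvFlagsOf t a r)
    have h3 := pvLeadRun_fst_nonneg (pvFlagsOf t a r)
    rw [pvLoopF _ 1 1 le_rfl le_rfl]
    omega
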